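-- pv_equiv track=rewrite | github.com/ZL173218/deimv2-reproduction-v1 | predict.py | _infer_square_size_from_anchors
-- ===== SOURCE A (Python) =====
-- import math
-- from typing import Iterable, List, Optional, Sequence, Tuple
--
-- def _anchor_count_for_size(height: int, width: int, strides: Sequence[int]) -> Optional[int]:
--     """Return the expected number of anchors for the provided resolution."""
--
--     if not strides:
--         return None
--
--     total = 0
--     for stride in strides:
--         if height % stride != 0 or width % stride != 0:
--             return None
--         total += (height // stride) * (width // stride)
--     return total
--
-- def _infer_square_size_from_anchors(anchor_count: int, strides: Sequence[int]) -> Optional[int]: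
--     """Infer a square evaluation size whose anchor grid matches ``anchor_count``."""
--
--     if not strides or anchor_count <= 0:
--         return None
--
--     lcm_stride = strides[0]
--     for stride in strides[1:]:
--         lcm_stride = math.lcm(lcm_stride, stride)
--
--     # Search over reasonable multiples of the LCM (up to 4096 pixels).
--     for multiplier in range(1, (4096 // lcm_stride) + 1):
--         size = lcm_stride * multiplier
--         total = _anchor_count_for_size(size, size, strides)
--         if total == anchor_count:
--             return size
--     return None
-- ===== SOURCE B (Python) =====
-- import math
--
-- def _infer_square_size_from_anchors(anchor_count, strides):
--     """Closed form: for size = m*L (L = lcm of strides), the anchor total is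
--     m**2 * sum((L//s)**2), so solve for m directly instead of scanning candidate sizes."""
--     if not strides or anchor_count <= 0:
--         return None
--     lcm_stride = strides[0]
--     for stride in strides[1:]:
--         lcm_stride = math.lcm(lcm_stride, stride)
--     if lcm_stride <= 0 or lcm_stride > 4096:
--         return None
--     coeff = sum((lcm_stride // s) ** 2 for s in strides)
--     if anchor_count % coeff != 0:
--         return None
--     q = anchor_count // coeff
--     m = math.isqrt(q)
--     if m * m != q:
--         return None
--     size = lcm_stride * m
--     if size > 4096:
--         return None
--     return size
-- ===== Notes on version B (the rewrite author's own statement) =====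
-- stated objective: alternative
-- what changed: B replaces A's linear scan over all multiples of the stride-LCM up to 4096 (each recomputing the full anchor total) by a closed-form solve: total(m*L) = m^2 * sum((L//s)^2), so m is recovered with one division and one integer square root, then verified.
import Mathlib
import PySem

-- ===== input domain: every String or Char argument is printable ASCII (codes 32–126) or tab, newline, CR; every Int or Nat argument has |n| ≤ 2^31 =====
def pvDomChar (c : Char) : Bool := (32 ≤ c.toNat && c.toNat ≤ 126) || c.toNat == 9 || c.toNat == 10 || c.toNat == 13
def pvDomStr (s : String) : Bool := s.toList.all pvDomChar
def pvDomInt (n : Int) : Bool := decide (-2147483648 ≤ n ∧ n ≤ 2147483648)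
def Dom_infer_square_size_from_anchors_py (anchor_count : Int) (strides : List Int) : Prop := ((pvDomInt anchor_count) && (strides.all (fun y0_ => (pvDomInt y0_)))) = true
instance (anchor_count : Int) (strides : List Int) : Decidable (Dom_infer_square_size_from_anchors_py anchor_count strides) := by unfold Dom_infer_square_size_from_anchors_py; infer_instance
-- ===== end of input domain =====

-- B replaces A's scan over candidate sizes by a closed-form solve:
-- total(m·L) = m²·Σ(L//s)², so m is recovered with one division and one isqrt.

-- ===== PORT A =====
-- shared by both ports: the lcm-fold both Pythons perform over strides[1:]
def pvLcmFold (s0 : Int) (rest : List Int) : Int :=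
  rest.foldl (fun acc s => ((Int.lcm acc s : Nat) : Int)) s0

-- loop body of _anchor_count_for_size (early return none on a non-divisible stride)
def pvACLoop (height width : Int) : List Int → Int → Option Int
  | [], total => some total
  | s :: restS, total =>
    if PySem.Int.mod height s ≠ 0 ∨ PySem.Int.mod width s ≠ 0 then none
    else pvACLoop height width restS
      (total + PySem.Int.floordiv height s * PySem.Int.floordiv width s)

def pvAnchorCountForSize (height width : Int) (strides : List Int) : Option Int :=
  if strides = [] then none else pvACLoop height width strides 0

-- the `for multiplier in range(...)` search with early return
def pvSearchLoop (ac lcm : Int) (strides : List Int) : List Int → Option Int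
  | [] => none
  | m :: restM =>
    let size := lcm * m
    if pvAnchorCountForSize size size strides = some ac then some size
    else pvSearchLoop ac lcm strides restM

def infer_square_size_from_anchors_py (anchor_count : Int) (strides : List Int) : Option Int :=
  match strides with
  | [] => none
  | s0 :: rest =>
    if anchor_count ≤ 0 then none
    else
      let lcm_stride := pvLcmFold s0 rest
      pvSearchLoop anchor_count lcm_stride (s0 :: rest)
        (PySem.List.pyRange 1 (PySem.Int.floordiv 4096 lcm_stride + 1) 1)

-- ===== PORT B =====
def infer_square_size_from_anchors_py_alt (anchor_count : Int) (strides : List Int) : Option Int :=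
  match strides with
  | [] => none
  | s0 :: rest =>
    if anchor_count ≤ 0 then none
    else
      let lcm_stride := pvLcmFold s0 rest
      if lcm_stride ≤ 0 ∨ 4096 < lcm_stride then none
      else
        let coeff := (s0 :: rest).foldl
          (fun acc s => acc + (PySem.Int.floordiv lcm_stride s) ^ 2) 0
        if PySem.Int.mod anchor_count coeff ≠ 0 then none
        else
          let q := PySem.Int.floordiv anchor_count coeff
          let m := (Nat.sqrt q.toNat : Int)
          if m * m ≠ q then none
          else
            let size := lcm_stride * m
            if 4096 < size then none else some size

-- ===== PRECONDITION & SPEC =====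
-- Pre_ excludes only the inputs where A raises ZeroDivisionError (a zero stride
-- reached with a nonempty stride list and a positive anchor_count).
def Pre_infer_square_size_from_anchors_py (anchor_count : Int) (strides : List Int) : Prop :=
  strides = [] ∨ anchor_count ≤ 0 ∨ (0 : Int) ∉ strides
instance (anchor_count : Int) (strides : List Int) : Decidable (Pre_infer_square_size_from_anchors_py anchor_count strides) := by unfold Pre_infer_square_size_from_anchors_py; infer_instance

def pvWitness_infer_square_size_from_anchors_py : Int × List Int := (8500, [8, 16, 32])

def Spec_infer_square_size_from_anchors_py (anchor_count : Int) (strides : List Int) (out : Option Int) : Prop := out = infer_square_size_from_anchors_py_alt anchor_count strides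
instance (anchor_count : Int) (strides : List Int) (out : Option Int) : Decidable (Spec_infer_square_size_from_anchors_py anchor_count strides out) := by unfold Spec_infer_square_size_from_anchors_py; infer_instance

-- ===== CLAIM (what is proved, stated in full; the proofs are below) =====
def Claim_equal_infer_square_size_from_anchors_py : Prop := ∀ (anchor_count : Int) (strides : List Int), Dom_infer_square_size_from_anchors_py anchor_count strides → Pre_infer_square_size_from_anchors_py anchor_count strides → Spec_infer_square_size_from_anchors_py anchor_count strides (infer_square_size_from_anchors_py anchor_count strides)

-- ===== LEMMAS AND PROOFS =====

-- the lcm fold is nonzero and a common multiple of all the strides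
theorem pvLcmFold_spec (s0 : Int) (rest : List Int) (h0 : s0 ≠ 0)
    (h : ∀ s ∈ rest, s ≠ 0) :
    pvLcmFold s0 rest ≠ 0 ∧ s0 ∣ pvLcmFold s0 rest ∧ ∀ s ∈ rest, s ∣ pvLcmFold s0 rest := by
  induction rest generalizing s0 with
  | nil => exact ⟨h0, dvd_refl _, by simp⟩
  | cons a tl ih =>
    have ha : a ≠ 0 := h a (by simp)
    have hl : ((Int.lcm s0 a : Nat) : Int) ≠ 0 := by
      have : s0.lcm a ≠ 0 := Nat.lcm_ne_zero (by simpa using h0) (by simpa using ha)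
      exact_mod_cast this
    obtain ⟨h1, h2, h3⟩ := ih ((Int.lcm s0 a : Nat) : Int) hl (fun s hs => h s (by simp [hs]))
    refine ⟨by simpa [pvLcmFold] using h1,
      dvd_trans (Int.dvd_lcm_left s0 a) (by simpa [pvLcmFold] using h2), ?_⟩
    intro s hs
    rcases List.mem_cons.mp hs with rfl | hs
    · exact dvd_trans (Int.dvd_lcm_right s0 s) (by simpa [pvLcmFold] using h2)
    · simpa [pvLcmFold] using h3 s hs

theorem pv_floordiv_of_dvd (a b : Int) (hb : b ≠ 0) (h : b ∣ a) :
    PySem.Int.floordiv a b = a / b := by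
  have hm : PySem.Int.mod a b = 0 := (PySem.Int.mod_eq_zero_iff_dvd a b).2 h
  have hfd := PySem.Int.floordiv_mul_add_mod a b
  rw [hm, add_zero] at hfd
  have : a / b = PySem.Int.floordiv a b := by
    conv_lhs => rw [← hfd]
    exact Int.mul_ediv_cancel _ hb
  exact this.symm

theorem pvACLoop_closed (L m : Int) (l : List Int)
    (hl : ∀ s ∈ l, s ≠ 0 ∧ s ∣ L) (total : Int) :
    pvACLoop (L * m) (L * m) l total
      = some (total + m ^ 2 * ((l.map (fun s => (L / s) ^ 2)).sum)) := by
  induction l generalizing total with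
  | nil => simp [pvACLoop]
  | cons a tl ih =>
    obtain ⟨ha, hd⟩ := hl a (by simp)
    have hdm : a ∣ L * m := hd.mul_right m
    have hmod : PySem.Int.mod (L * m) a = 0 := (PySem.Int.mod_eq_zero_iff_dvd _ a).2 hdm
    have hfd : PySem.Int.floordiv (L * m) a = (L / a) * m := by
      rw [pv_floordiv_of_dvd _ _ ha hdm]
      obtain ⟨t, rfl⟩ := hd
      rw [mul_assoc, Int.mul_ediv_cancel_left _ ha, Int.mul_ediv_cancel_left _ ha]
    simp only [pvACLoop, hmod, hfd, ne_eq, not_true_eq_false, or_self, if_false]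
    rw [ih (fun s hs => hl s (by simp [hs]))]
    congr 1
    simp only [List.map_cons, List.sum_cons]
    ring

theorem pvSearchLoop_none (ac L : Int) (strides : List Int) (l : List Int)
    (h : ∀ m ∈ l, pvAnchorCountForSize (L * m) (L * m) strides ≠ some ac) :
    pvSearchLoop ac L strides l = none := by
  induction l with
  | nil => rfl
  | cons a tl ih =>
    simp only [pvSearchLoop]
    rw [if_neg (h a (by simp))]
    exact ih (fun m hm => h m (by simp [hm]))

theorem pvSearchLoop_some (ac L : Int) (strides : List Int) (l : List Int) (m : Int)
    (hmem : m ∈ l)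
    (hP : pvAnchorCountForSize (L * m) (L * m) strides = some ac)
    (huniq : ∀ m' ∈ l, pvAnchorCountForSize (L * m') (L * m') strides = some ac → m' = m) :
    pvSearchLoop ac L strides l = some (L * m) := by
  induction l with
  | nil => cases hmem
  | cons a tl ih =>
    simp only [pvSearchLoop]
    by_cases hc : pvAnchorCountForSize (L * a) (L * a) strides = some ac
    · rw [if_pos hc]
      have : a = m := huniq a (by simp) hc
      simp [this]
    · rw [if_neg hc]
      have hm : m ∈ tl := by
        rcases List.mem_cons.mp hmem with rfl | h; · exact absurd hP hc
        · exact h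
      exact ih hm (fun m' hm' => huniq m' (by simp [hm']))

theorem infer_square_main (anchor_count s0 : Int) (rest : List Int)
    (hac : 0 < anchor_count) (h0 : s0 ≠ 0) (hz : ∀ s ∈ rest, s ≠ 0) :
    infer_square_size_from_anchors_py anchor_count (s0 :: rest)
      = infer_square_size_from_anchors_py_alt anchor_count (s0 :: rest) := by
  obtain ⟨hL0, hd0, hdr⟩ := pvLcmFold_spec s0 rest h0 hz
  set L := pvLcmFold s0 rest with hLdef
  have hdall : ∀ s ∈ s0 :: rest, s ≠ 0 ∧ s ∣ L := by
    intro s hs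
    rcases List.mem_cons.mp hs with rfl | h
    · exact ⟨h0, hd0⟩
    · exact ⟨hz s h, hdr s h⟩
  set C := (((s0 :: rest).map (fun s => (L / s) ^ 2)).sum) with hCdef
  have hC1 : 1 ≤ C := by
    have h1 : (L / s0) ≠ 0 := by
      intro he
      have := Int.ediv_mul_cancel hd0
      rw [he, zero_mul] at this
      exact hL0 this.symm
    have h2 : 1 ≤ (L / s0) ^ 2 := by
      have : 0 < (L / s0) ^ 2 := by positivity
      omega
    have h3 : 0 ≤ ((rest.map (fun s => (L / s) ^ 2)).sum) := by
      apply List.sum_nonneg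
      intro x hx
      obtain ⟨s, _, rfl⟩ := List.mem_map.mp hx
      positivity
    simp only [hCdef, List.map_cons, List.sum_cons]
    omega
  have hAC : ∀ m : Int, pvAnchorCountForSize (L * m) (L * m) (s0 :: rest)
      = some (m ^ 2 * C) := by
    intro m
    unfold pvAnchorCountForSize
    rw [if_neg (by simp), pvACLoop_closed L m _ hdall 0, zero_add]
  have hcoeff : (s0 :: rest).foldl (fun acc s => acc + (PySem.Int.floordiv L s) ^ 2) 0 = C := by
    rw [PySem.List.foldl_add, zero_add, hCdef]
    apply congrArg
    apply List.map_congr_left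
    intro s hs
    obtain ⟨hs0, hsd⟩ := hdall s hs
    rw [pv_floordiv_of_dvd _ _ hs0 hsd]
  have hacle : ¬ (anchor_count ≤ 0) := by omega
  simp only [infer_square_size_from_anchors_py, infer_square_size_from_anchors_py_alt,
    if_neg hacle, ← hLdef]
  rw [hcoeff]
  by_cases hLr : L ≤ 0 ∨ 4096 < L
  · rw [if_pos hLr]
    have hK : PySem.Int.floordiv 4096 L + 1 ≤ 1 := by
      rcases hLr with hneg | hbig
      · have hLlt : L < 0 := by omega
        have hmb := PySem.Int.mod_neg_bounds (a := 4096) hLlt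
        have hfm := PySem.Int.floordiv_mul_add_mod 4096 L
        by_contra hcon
        have hf1 : 1 ≤ PySem.Int.floordiv 4096 L := by omega
        nlinarith [hmb.1, hmb.2, hfm]
      · have : PySem.Int.floordiv 4096 L = 0 :=
          (PySem.Int.floordiv_eq_iff_of_pos (by omega)).2 ⟨by omega, by omega⟩
        omega
    rw [PySem.List.pyRange_one_eq_nil hK]
    rfl
  · rw [if_neg hLr]
    have hLpos : 0 < L := by omega
    have hL4096 : L ≤ 4096 := by omega
    set K := PySem.Int.floordiv 4096 L with hKdef
    have hbr : ∀ m : Int, m ≤ K ↔ m * L ≤ 4096 := by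
      intro m
      rw [hKdef]
      exact PySem.Int.le_floordiv_iff_mul_le hLpos
    by_cases hex : ∃ m, m ∈ PySem.List.pyRange 1 (K + 1) 1 ∧ m ^ 2 * C = anchor_count
    · obtain ⟨m, hmR, hPm⟩ := hex
      obtain ⟨hm1, hm2⟩ := (PySem.List.mem_pyRange_one).1 hmR
      have huniq : ∀ m' ∈ PySem.List.pyRange 1 (K + 1) 1,
          pvAnchorCountForSize (L * m') (L * m') (s0 :: rest) = some anchor_count → m' = m := by
        intro m' hm'R heq
        rw [hAC] at heq
        have hPm' : m' ^ 2 * C = anchor_count := Option.some.inj heq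
        have hm'1 : 1 ≤ m' := ((PySem.List.mem_pyRange_one).1 hm'R).1
        have hz2 : (m' - m) * (m' + m) * C = 0 := by linear_combination hPm' - hPm
        rcases mul_eq_zero.1 hz2 with hz3 | hz3
        · rcases mul_eq_zero.1 hz3 with hz4 | hz4 <;> omega
        · omega
      rw [pvSearchLoop_some anchor_count L _ _ m hmR
        (by rw [hAC]; exact congrArg some hPm) huniq]
      have hdvd : C ∣ anchor_count := ⟨m ^ 2, by rw [← hPm]; ring⟩
      have hmod0 : PySem.Int.mod anchor_count C = 0 := (PySem.Int.mod_eq_zero_iff_dvd _ _).2 hdvd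
      rw [if_neg (by simp [hmod0])]
      have hq : PySem.Int.floordiv anchor_count C = m ^ 2 := by
        rw [pv_floordiv_of_dvd _ _ (by omega) hdvd, ← hPm, Int.mul_ediv_cancel _ (by omega)]
      rw [hq]
      have hsq : ((Nat.sqrt (m ^ 2).toNat : Nat) : Int) = m := by
        have hm0 : 0 ≤ m := by omega
        have ht : m ^ 2 = ((m.toNat ^ 2 : Nat) : Int) := by
          push_cast [Int.toNat_of_nonneg hm0]
          ring
        rw [ht, Int.toNat_natCast, Nat.sqrt_eq', Int.toNat_of_nonneg hm0]
      rw [hsq]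
      rw [if_neg (by intro hcon; exact hcon (by ring))]
      rw [if_neg (by rw [mul_comm]; exact not_lt.2 ((hbr m).1 (by omega)))]
    · rw [pvSearchLoop_none]
      swap
      · intro m hmR heq
        rw [hAC] at heq
        exact hex ⟨m, hmR, Option.some.inj heq⟩
      by_cases h1 : PySem.Int.mod anchor_count C ≠ 0
      · rw [if_pos h1]
      · rw [if_neg h1]
        have hdvd : C ∣ anchor_count := (PySem.Int.mod_eq_zero_iff_dvd _ _).1 (by omega)
        have hqv : PySem.Int.floordiv anchor_count C * C = anchor_count := by
          rw [pv_floordiv_of_dvd _ _ (by omega) hdvd]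
          exact Int.ediv_mul_cancel hdvd
        set q := PySem.Int.floordiv anchor_count C with hqdef
        have hqpos : 0 < q := by nlinarith
        set mB : Int := ((Nat.sqrt q.toNat : Nat) : Int) with hmBdef
        have hmB0 : 0 ≤ mB := by rw [hmBdef]; positivity
        by_cases h2 : mB * mB ≠ q
        · rw [if_pos h2]
        · rw [if_neg h2]
          have hmBq : mB * mB = q := by omega
          have hmB1 : 1 ≤ mB := by nlinarith
          by_cases h3 : 4096 < L * mB
          · rw [if_pos h3]
          · exfalso
            apply hex
            refine ⟨mB, (PySem.List.mem_pyRange_one).2 ⟨hmB1, ?_⟩, ?_⟩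
            · have hle : mB * L ≤ 4096 := by rw [mul_comm]; exact not_lt.1 h3
              have := (hbr mB).2 hle
              omega
            · rw [pow_two, hmBq, hqv]

-- ===== VERDICT (by name: the statement is the Claim_ definition above) =====
theorem infer_square_size_from_anchors_py_spec : Claim_equal_infer_square_size_from_anchors_py := by
  intro ac strides _ hpre
  unfold Spec_infer_square_size_from_anchors_py
  match strides with
  | [] => rfl
  | s0 :: rest =>
    by_cases h : ac ≤ 0
    · simp [infer_square_size_from_anchors_py, infer_square_size_from_anchors_py_alt, h]
    · have hz : (0 : Int) ∉ s0 :: rest := by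
        rcases hpre with h1 | h1 | h1
        · cases h1
        · omega
        · exact h1
      exact infer_square_main ac s0 rest (by omega) (fun e => hz (by simp [e]))
        (fun s hs e => hz (by simp [hs, ← e]))
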